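-- pv_equiv track=rewrite | github.com/mkmuniga/Content | patch/ccf_utdb/utdb/logdb_cfg/cfi_trk/cfi_bin2logdb_common.py | get_interleaved_address
-- ===== SOURCE A (Python) =====
-- def get_interleaved_address(addr0, addr1, start_bit):
--     addr = 0
--     for i in range(start_bit,46):
--         # take even bits from addr0, odd - from addr1
--         if (i % 2):
--             a = addr1 & 1
--             addr1 >>= 1
--         else:
--             a = addr0 & 1
--             addr0 >>= 1
--         # shift bit to the right position
--         a <<= i
--         addr += a
--     return (addr)
-- ===== SOURCE B (Python) =====
-- def get_interleaved_address(addr0, addr1, start_bit):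
--     # Two independent passes: even output positions take consecutive bits of
--     # addr0, odd positions take consecutive bits of addr1; reads are
--     # non-destructive indexed bit extractions.
--     res = 0
--     e = start_bit + (start_bit % 2)      # first even output position >= start_bit
--     o = start_bit + 1 - (start_bit % 2)  # first odd output position >= start_bit
--     for j in range((47 - e) // 2):
--         res += ((addr0 >> j) & 1) << (e + 2 * j)
--     for j in range((47 - o) // 2):
--         res += ((addr1 >> j) & 1) << (o + 2 * j)
--     return res
-- ===== Notes on version B (the rewrite author's own statement) =====
-- stated objective: alternative
-- what changed: A's single destructive loop that shifts addr0/addr1 while interleaving is replaced by two independent passes, one over even and one over odd output positions, each reading bits non-destructively by index ((addr >> j) & 1) and accumulating into one integer.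
import Mathlib
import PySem

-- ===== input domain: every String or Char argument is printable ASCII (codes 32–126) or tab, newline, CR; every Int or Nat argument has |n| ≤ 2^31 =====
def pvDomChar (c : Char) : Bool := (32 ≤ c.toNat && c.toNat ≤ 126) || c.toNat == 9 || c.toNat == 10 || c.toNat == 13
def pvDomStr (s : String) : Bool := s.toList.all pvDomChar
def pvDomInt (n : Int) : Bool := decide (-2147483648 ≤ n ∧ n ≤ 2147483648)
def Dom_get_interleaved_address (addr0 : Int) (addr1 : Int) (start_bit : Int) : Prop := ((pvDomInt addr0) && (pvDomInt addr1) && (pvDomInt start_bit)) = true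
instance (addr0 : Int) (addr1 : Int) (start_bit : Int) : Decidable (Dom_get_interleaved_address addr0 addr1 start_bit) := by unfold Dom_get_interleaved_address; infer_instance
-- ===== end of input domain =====

-- B replaces A's single destructive interleaving loop by two independent passes with
-- non-destructive indexed bit reads (objective: alternative decomposition, same cost).

-- ===== PORT A =====
-- `x & 1` → PySem.Int.mod x 2, `x >>= 1` → PySem.Int.floordiv x 2 (exact: Python's
-- arithmetic shift is floor division), `a <<= i` → a * 2 ^ i.toNat (exact for i ≥ 0;
-- Python raises ValueError on a negative shift count, excluded by Pre_).
def get_interleaved_address (addr0 : Int) (addr1 : Int) (start_bit : Int) : Int :=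
  ((PySem.List.pyRange start_bit 46 1).foldl
      (fun (st : Int × Int × Int) i =>
        if PySem.Int.mod i 2 ≠ 0 then
          (st.1 + PySem.Int.mod st.2.2 2 * 2 ^ i.toNat, st.2.1, PySem.Int.floordiv st.2.2 2)
        else
          (st.1 + PySem.Int.mod st.2.1 2 * 2 ^ i.toNat, PySem.Int.floordiv st.2.1 2, st.2.2))
      (0, addr0, addr1)).1

-- ===== PORT B =====
-- `(a >> j) & 1` → PySem.Int.mod (PySem.Int.floordiv a (2 ^ j.toNat)) 2 (exact for j ≥ 0),
-- `x << p` → x * 2 ^ p.toNat (exact for p ≥ 0; negative shifts excluded by Pre_).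
def get_interleaved_address_alt (addr0 : Int) (addr1 : Int) (start_bit : Int) : Int :=
  let e := start_bit + PySem.Int.mod start_bit 2
  let o := start_bit + 1 - PySem.Int.mod start_bit 2
  let res := (PySem.List.pyRange 0 (PySem.Int.floordiv (47 - e) 2) 1).foldl
      (fun res j =>
        res + PySem.Int.mod (PySem.Int.floordiv addr0 (2 ^ j.toNat)) 2 * 2 ^ (e + 2 * j).toNat) 0
  (PySem.List.pyRange 0 (PySem.Int.floordiv (47 - o) 2) 1).foldl
      (fun res j =>
        res + PySem.Int.mod (PySem.Int.floordiv addr1 (2 ^ j.toNat)) 2 * 2 ^ (o + 2 * j).toNat) res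

-- ===== PRECONDITION & SPEC =====
-- Pre_ excludes start_bit < 0, on which Python's `a <<= i` hits a negative shift count
-- and A raises ValueError (B raises there too).
def Pre_get_interleaved_address (addr0 : Int) (addr1 : Int) (start_bit : Int) : Prop :=
  0 ≤ start_bit
instance (addr0 : Int) (addr1 : Int) (start_bit : Int) : Decidable (Pre_get_interleaved_address addr0 addr1 start_bit) := by unfold Pre_get_interleaved_address; infer_instance
def pvWitness_get_interleaved_address : Int × Int × Int := (5, 3, 1)

def Spec_get_interleaved_address (addr0 : Int) (addr1 : Int) (start_bit : Int) (out : Int) : Prop := out = get_interleaved_address_alt addr0 addr1 start_bit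
instance (addr0 : Int) (addr1 : Int) (start_bit : Int) (out : Int) : Decidable (Spec_get_interleaved_address addr0 addr1 start_bit out) := by unfold Spec_get_interleaved_address; infer_instance

-- ===== CLAIM (what is proved, stated in full; the proofs are below) =====
def Claim_equal_get_interleaved_address : Prop := ∀ (addr0 : Int) (addr1 : Int) (start_bit : Int), Dom_get_interleaved_address addr0 addr1 start_bit → Pre_get_interleaved_address addr0 addr1 start_bit → Spec_get_interleaved_address addr0 addr1 start_bit (get_interleaved_address addr0 addr1 start_bit)

-- ===== LEMMAS AND PROOFS =====

-- Bridges from PySem's floor division/modulus to Euclidean `/`/`%` (equal for positive divisors).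
theorem pv_fdiv2 (a : Int) : PySem.Int.floordiv a 2 = a / 2 := by
  unfold PySem.Int.floordiv; rw [Int.fdiv_eq_ediv]; norm_num

theorem pv_fdivPow (a : Int) (j : ℕ) : PySem.Int.floordiv a (2 ^ j) = a / 2 ^ j := by
  unfold PySem.Int.floordiv; rw [Int.fdiv_eq_ediv]
  simp [show (0:Int) ≤ 2 ^ j by positivity]

theorem pv_mod2 (a : Int) : PySem.Int.mod a 2 = a % 2 := by
  unfold PySem.Int.mod; rw [Int.fmod_eq_emod]; norm_num

-- A fold that only adds `g` of each element is the initial value plus a sum.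
theorem pv_foldl_add (g : Int → Int) : ∀ (l : List Int) (init : Int),
    l.foldl (fun r j => r + g j) init = init + (l.map g).sum := by
  intro l
  induction l with
  | nil => simp
  | cons a t ih => intro init; simp [ih, add_assoc]

theorem pv_sum_listRange (g : Int → Int) (n : ℕ) :
    (List.map (fun k : ℕ => g (k : Int)) (List.range n)).sum = ∑ j ∈ Finset.range n, g (j : Int) := by
  induction n with
  | zero => simp
  | succ n ih =>
    rw [List.range_succ, List.map_append, List.sum_append, Finset.sum_range_succ, ih]
    simp

theorem pv_sum_pyRange (g : Int → Int) (m : Int) :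
    ((PySem.List.pyRange 0 m 1).map g).sum = ∑ j ∈ Finset.range m.toNat, g (j : Int) := by
  rw [PySem.List.pyRange_one, List.map_map]
  simp only [Function.comp_def, zero_add, Int.sub_zero]
  exact pv_sum_listRange g m.toNat

-- The value both programs compute: bits j of `a` placed at positions e, e+2, e+4, …
def pvBitSum (a e : Int) (m : ℕ) : Int :=
  ∑ j ∈ Finset.range m, a / 2 ^ j % 2 * 2 ^ (e + 2 * (j : Int)).toNat

theorem pv_bitSum_succ (a e : Int) (m : ℕ) :
    pvBitSum a e (m + 1) = a % 2 * 2 ^ e.toNat + pvBitSum (a / 2) (e + 2) m := by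
  unfold pvBitSum
  rw [Finset.sum_range_succ']
  have h0 : a / 2 ^ (0:ℕ) % 2 * 2 ^ (e + 2 * ((0:ℕ) : Int)).toNat = a % 2 * 2 ^ e.toNat := by
    norm_num
  have hs : ∀ j ∈ Finset.range m,
      a / 2 ^ (j + 1) % 2 * 2 ^ (e + 2 * ((j + 1 : ℕ) : Int)).toNat
        = a / 2 / 2 ^ j % 2 * 2 ^ (e + 2 + 2 * (j : Int)).toNat := by
    intro j _
    have h1 : a / 2 ^ (j + 1) = a / 2 / 2 ^ j := by
      rw [Int.ediv_ediv_of_nonneg (by norm_num), ← pow_succ']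
    have h2 : (e + 2 * ((j + 1 : ℕ) : Int)) = e + 2 + 2 * (j : Int) := by push_cast; ring
    rw [h1, h2]
  rw [Finset.sum_congr rfl hs, h0, add_comm]

theorem pv_bitSum_empty (a e acc : Int) (h : 46 ≤ e) :
    acc + pvBitSum a e ((47 - e) / 2).toNat = acc := by
  have : ((47 - e) / 2).toNat = 0 := by omega
  rw [this]; unfold pvBitSum; simp

-- Invariant of A's loop: from position s on, the loop adds exactly B's two bit sums.
theorem pv_A_loop (n : ℕ) : ∀ (s a0 a1 acc : Int), 0 ≤ s → 46 - s ≤ (n : Int) →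
    ((PySem.List.pyRange s 46 1).foldl
      (fun (st : Int × Int × Int) i =>
        if PySem.Int.mod i 2 ≠ 0 then
          (st.1 + PySem.Int.mod st.2.2 2 * 2 ^ i.toNat, st.2.1, PySem.Int.floordiv st.2.2 2)
        else
          (st.1 + PySem.Int.mod st.2.1 2 * 2 ^ i.toNat, PySem.Int.floordiv st.2.1 2, st.2.2))
      (acc, a0, a1)).1
      = acc + pvBitSum a0 (s + s % 2) ((47 - (s + s % 2)) / 2).toNat
            + pvBitSum a1 (s + 1 - s % 2) ((47 - (s + 1 - s % 2)) / 2).toNat := by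
  induction n with
  | zero =>
    intro s a0 a1 acc hs hn
    rw [PySem.List.pyRange_one_eq_nil (by omega)]
    simp only [List.foldl_nil]
    rw [add_assoc, pv_bitSum_empty _ _ _ (by omega), pv_bitSum_empty _ _ _ (by omega)]
  | succ n ih =>
    intro s a0 a1 acc hs hn
    by_cases h46 : 46 ≤ s
    · rw [PySem.List.pyRange_one_eq_nil (by omega)]
      simp only [List.foldl_nil]
      rw [add_assoc, pv_bitSum_empty _ _ _ (by omega), pv_bitSum_empty _ _ _ (by omega)]
    · rw [PySem.List.pyRange_one_cons (by omega), List.foldl_cons]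
      rcases Int.emod_two_eq s with hpar | hpar
      · -- s even: the loop consumes a bit of a0
        simp only [pv_mod2, pv_fdiv2, hpar, ne_eq, not_true_eq_false, if_false, add_zero,
          sub_zero]
        have hp1 : (s + 1) % 2 = 1 := by omega
        have H := ih (s + 1) (a0 / 2) a1 (acc + a0 % 2 * 2 ^ s.toNat) (by omega) (by omega)
        simp only [pv_mod2, pv_fdiv2, ne_eq, hp1] at H
        have e2 : s + 1 + 1 - 1 = s + 1 := by ring
        have e1 : s + 1 + 1 = s + 2 := by ring
        rw [e2, e1] at H
        rw [H]
        have hm : ((47 - s) / 2).toNat = ((47 - (s + 2)) / 2).toNat + 1 := by omega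
        rw [hm, pv_bitSum_succ]
        ring
      · -- s odd: the loop consumes a bit of a1
        simp only [pv_mod2, pv_fdiv2, hpar, ne_eq, one_ne_zero, not_false_eq_true, if_true]
        have e0 : s + 1 - 1 = s := by ring
        rw [e0]
        have hp1 : (s + 1) % 2 = 0 := by omega
        have H := ih (s + 1) a0 (a1 / 2) (acc + a1 % 2 * 2 ^ s.toNat) (by omega) (by omega)
        simp only [pv_mod2, pv_fdiv2, ne_eq, hp1, add_zero, sub_zero] at H
        have e1 : s + 1 + 1 = s + 2 := by ring
        rw [e1] at H
        rw [H]
        have hm : ((47 - s) / 2).toNat = ((47 - (s + 2)) / 2).toNat + 1 := by omega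
        rw [hm, pv_bitSum_succ]
        ring

theorem pv_B_eq (a0 a1 s : Int) :
    get_interleaved_address_alt a0 a1 s
      = pvBitSum a0 (s + s % 2) ((47 - (s + s % 2)) / 2).toNat
        + pvBitSum a1 (s + 1 - s % 2) ((47 - (s + 1 - s % 2)) / 2).toNat := by
  unfold get_interleaved_address_alt
  simp only [pv_mod2, pv_fdiv2]
  rw [pv_foldl_add, pv_foldl_add, pv_sum_pyRange, pv_sum_pyRange]
  unfold pvBitSum
  simp only [Int.toNat_natCast, pv_fdivPow, zero_add]

-- ===== VERDICT (by name: the statement is the Claim_ definition above) =====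
theorem get_interleaved_address_spec : Claim_equal_get_interleaved_address := by
  intro addr0 addr1 start_bit _ hpre
  unfold Spec_get_interleaved_address
  unfold Pre_get_interleaved_address at hpre
  unfold get_interleaved_address
  rw [pv_A_loop 46 start_bit addr0 addr1 0 hpre (by omega), pv_B_eq, zero_add]
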